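-- pv_equiv track=rewrite | github.com/rythm-net/SoftUni | Fundamentals with Python/T09 - Functions/moreExercise/05. Multiplication Sign.py | find_positive_or_negative
-- ===== SOURCE A (Python) =====
-- def find_positive_or_negative(numbers):
--     negative = []
--     zero_found = False
--     for x in numbers:
--         if x < 0:
--             negative.append(1)
--         elif x == 0:
--             zero_found = True
--
--     if zero_found:
--         return 'zero'
--     elif len(negative) % 2 == 0:
--         return "positive"
--     elif len(negative) % 2 != 0:
--         return "negative"
-- ===== SOURCE B (Python) =====
-- def sign_of(x):
--     if x < 0:
--         return 'negative'
--     if x == 0: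
--         return 'zero'
--     return 'positive'
--
--
-- def sign_mul(a, b):
--     if a == 'zero' or b == 'zero':
--         return 'zero'
--     return 'positive' if a == b else 'negative'
--
--
-- def find_positive_or_negative(numbers):
--     result = 'positive'
--     for x in numbers:
--         result = sign_mul(result, sign_of(x))
--     return result
-- ===== Notes on version B (the rewrite author's own statement) =====
-- stated objective: alternative
-- what changed: Replaces the materialised negatives list, zero flag and end-of-loop len%2 parity branch with a map-reduce over the three-element sign monoid: each element is mapped to its sign string and the answer is the monoid product under an explicit sign-multiplication table, so no count, no parity test and no flag exist.
import Mathlib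
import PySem

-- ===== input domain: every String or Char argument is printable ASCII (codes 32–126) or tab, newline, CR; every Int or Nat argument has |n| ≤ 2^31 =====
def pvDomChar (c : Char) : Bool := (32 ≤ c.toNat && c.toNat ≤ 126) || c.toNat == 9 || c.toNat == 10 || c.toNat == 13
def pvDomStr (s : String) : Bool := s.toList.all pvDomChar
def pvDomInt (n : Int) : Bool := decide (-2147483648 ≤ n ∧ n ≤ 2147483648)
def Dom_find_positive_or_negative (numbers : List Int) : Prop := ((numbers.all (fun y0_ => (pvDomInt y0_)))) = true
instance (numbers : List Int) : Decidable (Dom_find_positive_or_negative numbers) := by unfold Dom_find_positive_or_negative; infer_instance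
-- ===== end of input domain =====

-- B replaces A's negatives list + zero flag + parity branch with a map-reduce over the three-element sign monoid (table-driven sign multiplication); alternative decomposition, O(1) space.


-- ===== PORT A =====
-- A: collect a marker list for negatives and a zero flag in one pass, then branch on flag / list length parity.
def find_positive_or_negative (numbers : List Int) : String :=
  let st := numbers.foldl
    (fun (acc : List Int × Bool) x =>
      if x < 0 then (acc.1 ++ [1], acc.2)
      else if x = 0 then (acc.1, true)
      else acc)
    ([], false)
  if st.2 then "zero"
  else if st.1.length % 2 == 0 then "positive"
  else "negative"

-- ===== PORT B =====
-- B: map each element to its sign string, reduce with the sign-multiplication table.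
def pvSignOf (x : Int) : String :=
  if x < 0 then "negative"
  else if x = 0 then "zero"
  else "positive"

def pvSignMul (a b : String) : String :=
  if a == "zero" || b == "zero" then "zero"
  else if a == b then "positive"
  else "negative"

def find_positive_or_negative_alt (numbers : List Int) : String :=
  numbers.foldl (fun r x => pvSignMul r (pvSignOf x)) "positive"

-- ===== PRECONDITION & SPEC =====
def Spec_find_positive_or_negative (numbers : List Int) (out : String) : Prop := out = find_positive_or_negative_alt numbers
instance (numbers : List Int) (out : String) : Decidable (Spec_find_positive_or_negative numbers out) := by unfold Spec_find_positive_or_negative; infer_instance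

-- ===== CLAIM (what is proved, stated in full; the proofs are below) =====
def Claim_equal_find_positive_or_negative : Prop := ∀ (numbers : List Int), Dom_find_positive_or_negative numbers → Spec_find_positive_or_negative numbers (find_positive_or_negative numbers)

-- ===== LEMMAS AND PROOFS =====

-- interpretation of A's loop state as a sign string
def pvInterp (acc : List Int) (b : Bool) : String :=
  if b then "zero" else if acc.length % 2 == 0 then "positive" else "negative"

lemma pv_main (xs : List Int) (acc : List Int) (b : Bool) :
    (let st := xs.foldl
      (fun (acc : List Int × Bool) x =>
        if x < 0 then (acc.1 ++ [1], acc.2)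
        else if x = 0 then (acc.1, true)
        else acc)
      (acc, b)
     if st.2 then "zero"
     else if st.1.length % 2 == 0 then "positive"
     else "negative")
    = xs.foldl (fun r x => pvSignMul r (pvSignOf x)) (pvInterp acc b) := by
  induction xs generalizing acc b with
  | nil => cases b <;> simp [pvInterp]
  | cons x xs ih =>
    simp only [List.foldl_cons]
    by_cases hneg : x < 0
    · simp only [if_pos hneg]
      rw [ih]
      congr 1
      by_cases hp : acc.length % 2 = 0
      · have h1 : (acc.length + 1) % 2 = 1 := by omega
        cases b <;> simp [pvInterp, pvSignOf, pvSignMul, hneg, hp, h1]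
      · have hp' : acc.length % 2 = 1 := by omega
        have h1 : (acc.length + 1) % 2 = 0 := by omega
        cases b <;> simp [pvInterp, pvSignOf, pvSignMul, hneg, hp', h1]
    · by_cases hz : x = 0
      · simp only [if_neg hneg, if_pos hz]
        rw [ih]
        congr 1
        cases b <;> simp [pvInterp, pvSignOf, pvSignMul, hz]
      · simp only [if_neg hneg, if_neg hz]
        rw [ih]
        congr 1
        cases b <;> simp [pvInterp, pvSignOf, pvSignMul, hz, hneg]

-- ===== VERDICT (by name: the statement is the Claim_ definition above) =====
theorem find_positive_or_negative_spec : Claim_equal_find_positive_or_negative := by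
  intro numbers _
  unfold Spec_find_positive_or_negative find_positive_or_negative find_positive_or_negative_alt
  simpa [pvInterp] using pv_main numbers [] false
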